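-- pv_equiv track=rewrite | github.com/MR989/MyCode | test2.cpp/virtuas1.py | street
-- ===== SOURCE A (Python) =====
-- def street(input1,input2):
--     L=input1
--
--     cordinates=input2
--     sum=0
--     x=0
--     y=0
--     commonregion=0
--     for i in range(0,L):
--
--         x=cordinates[i][1]-cordinates[i][0]
--         sum+=x
--         if i!=0:
--             y=cordinates[i-1][1]-cordinates[i][0]
--             commonregion+=y
--
--
--
--     for i in range(1,L):
--         y=cordinates[i-1][1]-cordinates[i][0]
--         commonregion+=y
--     return sum-commonregion
-- ===== SOURCE B (Python) =====
-- def street(input1, input2):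
--     # A double-counts each overlap (it adds commonregion twice); those overlap
--     # terms telescope, so the answer is 2*(last right end - first left end)
--     # minus the total length of the segments.
--     if input1 < 1:
--         return 0
--     s = 0
--     for seg in input2[:input1]:
--         s += seg[1] - seg[0]
--     return 2 * (input2[input1 - 1][1] - input2[0][0]) - s
-- ===== Notes on version B (the rewrite author's own statement) =====
-- stated objective: simpler
-- what changed: B replaces A's two passes maintaining a commonregion accumulator by one pass summing segment lengths plus a closed-form boundary correction 2*(last[1]-first[0]), exploiting that A's doubled overlap sum telescopes.
import Mathlib
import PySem

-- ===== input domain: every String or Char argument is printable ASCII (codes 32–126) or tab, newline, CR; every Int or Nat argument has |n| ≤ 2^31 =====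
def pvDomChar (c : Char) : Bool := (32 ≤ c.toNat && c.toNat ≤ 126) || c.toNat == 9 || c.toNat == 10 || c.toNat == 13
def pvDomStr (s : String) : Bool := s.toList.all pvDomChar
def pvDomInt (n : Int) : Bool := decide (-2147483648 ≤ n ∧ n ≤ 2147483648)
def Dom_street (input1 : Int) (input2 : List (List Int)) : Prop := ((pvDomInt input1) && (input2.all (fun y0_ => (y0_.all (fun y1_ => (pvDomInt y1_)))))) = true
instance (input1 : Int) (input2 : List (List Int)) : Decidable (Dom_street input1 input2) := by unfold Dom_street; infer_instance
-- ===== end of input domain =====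

-- B replaces A's two commonregion passes by one segment-length sum plus the closed-form
-- boundary term 2*(last[1]-first[0]) (the doubled overlap sum telescopes); objective: simpler.


-- ===== PORT A =====
-- cordinates[i][j] (in range under Pre_street; pyGetD's default is never read there)
def pvGet2 (c : List (List Int)) (i j : Int) : Int :=
  PySem.List.pyGetD (PySem.List.pyGetD c i []) j 0

def street (input1 : Int) (input2 : List (List Int)) : Int :=
  let L := input1
  let c := input2
  -- first for-loop: state (sum, commonregion)
  let st := (PySem.List.pyRange 0 L 1).foldl
    (fun (st : Int × Int) i =>
      let x := pvGet2 c i 1 - pvGet2 c i 0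
      let s := st.1 + x
      let cr := if i ≠ 0 then st.2 + (pvGet2 c (i - 1) 1 - pvGet2 c i 0) else st.2
      (s, cr)) (0, 0)
  -- second for-loop, continuing commonregion
  let cr := (PySem.List.pyRange 1 L 1).foldl
    (fun cr i => cr + (pvGet2 c (i - 1) 1 - pvGet2 c i 0)) st.2
  st.1 - cr

-- ===== PORT B =====
def street_alt (input1 : Int) (input2 : List (List Int)) : Int :=
  if input1 < 1 then 0
  else
    let s := (PySem.List.slice input2 none (some input1)).foldl
      (fun acc seg => acc + (PySem.List.pyGetD seg 1 0 - PySem.List.pyGetD seg 0 0)) 0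
    2 * (PySem.List.pyGetD (PySem.List.pyGetD input2 (input1 - 1) []) 1 0
         - PySem.List.pyGetD (PySem.List.pyGetD input2 0 []) 0 0) - s

-- ===== PRECONDITION & SPEC =====
-- Pre_ excludes exactly the inputs on which Python A raises IndexError:
-- input1 larger than the list, or a row among the first input1 with fewer than 2 entries.
def Pre_street (input1 : Int) (input2 : List (List Int)) : Prop :=
  input1 ≤ input2.length ∧ ∀ l ∈ input2.take input1.toNat, 2 ≤ l.length
instance (input1 : Int) (input2 : List (List Int)) : Decidable (Pre_street input1 input2) := by
  unfold Pre_street; infer_instance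

def pvWitness_street : Int × List (List Int) := (2, [[0, 3], [2, 5]])

def Spec_street (input1 : Int) (input2 : List (List Int)) (out : Int) : Prop := out = street_alt input1 input2
instance (input1 : Int) (input2 : List (List Int)) (out : Int) : Decidable (Spec_street input1 input2 out) := by unfold Spec_street; infer_instance

-- ===== CLAIM (what is proved, stated in full; the proofs are below) =====
def Claim_equal_street : Prop := ∀ (input1 : Int) (input2 : List (List Int)), Dom_street input1 input2 → Pre_street input1 input2 → Spec_street input1 input2 (street input1 input2)

-- ===== LEMMAS AND PROOFS =====

-- left end / right end of row k, with getD defaults (in range under Pre_)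
def pvL (cs : List (List Int)) (k : ℕ) : Int := (cs.getD k []).getD 0 0
def pvR (cs : List (List Int)) (k : ℕ) : Int := (cs.getD k []).getD 1 0
-- total of segment lengths over the first n rows
def pvF (cs : List (List Int)) (n : ℕ) : Int := ∑ k ∈ Finset.range n, (pvR cs k - pvL cs k)
-- commonregion after the iteration i = n-1 of either loop
def pvG (cs : List (List Int)) (n : ℕ) : Int :=
  ∑ k ∈ Finset.range n, (if k = 0 then 0 else pvR cs (k - 1) - pvL cs k)

theorem pvGet2_one (cs : List (List Int)) (k : ℕ) : pvGet2 cs (k : Int) 1 = pvR cs k := by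
  simp [pvGet2, pvR, PySem.List.pyGetD_natCast, PySem.List.pyGetD_ofNat', List.getD]

theorem pvGet2_zero (cs : List (List Int)) (k : ℕ) : pvGet2 cs (k : Int) 0 = pvL cs k := by
  simp [pvGet2, pvL, PySem.List.pyGetD_natCast, PySem.List.pyGetD_zero, List.getD]

theorem pvGet2_pred (cs : List (List Int)) (k : ℕ) (hk : 1 ≤ k) :
    pvGet2 cs ((k : Int) - 1) 1 = pvR cs (k - 1) := by
  have h : ((k : Int) - 1) = ((k - 1 : ℕ) : Int) := by omega
  rw [h, pvGet2_one]

theorem fold1_eq (cs : List (List Int)) (n : ℕ) (p : Int × Int) :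
    (PySem.List.pyRange 0 (n : Int) 1).foldl
      (fun (st : Int × Int) i =>
        let x := pvGet2 cs i 1 - pvGet2 cs i 0
        let s := st.1 + x
        let cr := if i ≠ 0 then st.2 + (pvGet2 cs (i - 1) 1 - pvGet2 cs i 0) else st.2
        (s, cr)) p = (p.1 + pvF cs n, p.2 + pvG cs n) := by
  induction n generalizing p with
  | zero => simp [PySem.List.pyRange_one_eq_nil, pvF, pvG]
  | succ m ih =>
    have hs : PySem.List.pyRange 0 ((m + 1 : ℕ) : Int) 1
        = PySem.List.pyRange 0 (m : Int) 1 ++ [(m : Int)] := by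
      have h : ((m + 1 : ℕ) : Int) = (m : Int) + 1 := by omega
      rw [h, PySem.List.pyRange_one_succ_right (by omega)]
    rw [hs, List.foldl_append, ih]
    simp only [List.foldl_cons, List.foldl_nil]
    by_cases hm : m = 0
    · subst hm
      have h1 := pvGet2_one cs 0
      have h0 := pvGet2_zero cs 0
      simp only [Nat.cast_zero] at h1 h0
      simp [pvF, pvG, h1, h0]
    · have h1 : (m : Int) ≠ 0 := by omega
      rw [if_pos h1, pvGet2_one, pvGet2_zero, pvGet2_pred cs m (by omega)]
      simp only [pvF, pvG, Finset.sum_range_succ, if_neg hm, Prod.ext_iff]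
      constructor <;> ring

theorem fold2_eq (cs : List (List Int)) (n : ℕ) (a : Int) :
    (PySem.List.pyRange 1 (n : Int) 1).foldl
      (fun cr i => cr + (pvGet2 cs (i - 1) 1 - pvGet2 cs i 0)) a = a + pvG cs n := by
  induction n generalizing a with
  | zero => simp [PySem.List.pyRange_one_eq_nil, pvG]
  | succ m ih =>
    by_cases hm : m = 0
    · subst hm
      rw [PySem.List.pyRange_one_eq_nil (by omega)]
      simp [pvG]
    · have hs : PySem.List.pyRange 1 ((m + 1 : ℕ) : Int) 1
          = PySem.List.pyRange 1 (m : Int) 1 ++ [(m : Int)] := by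
        have h : ((m + 1 : ℕ) : Int) = (m : Int) + 1 := by omega
        rw [h, PySem.List.pyRange_one_succ_right (by omega)]
      rw [hs, List.foldl_append, ih]
      simp only [List.foldl_cons, List.foldl_nil]
      rw [pvGet2_zero, pvGet2_pred cs m (by omega)]
      simp only [pvG, Finset.sum_range_succ, if_neg hm]
      ring

theorem fold3_eq (cs : List (List Int)) (n : ℕ) (hn : n ≤ cs.length) (a : Int) :
    (cs.take n).foldl
      (fun acc seg => acc + (PySem.List.pyGetD seg 1 0 - PySem.List.pyGetD seg 0 0)) a
      = a + pvF cs n := by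
  induction n generalizing a with
  | zero => simp [pvF]
  | succ m ih =>
    have hm : m < cs.length := by omega
    have ht : cs.take (m + 1) = cs.take m ++ [cs[m]] := by
      rw [List.take_add_one]
      simp [List.getElem?_eq_getElem hm]
    rw [ht, List.foldl_append, ih (by omega)]
    simp only [List.foldl_cons, List.foldl_nil]
    rw [PySem.List.pyGetD_ofNat', PySem.List.pyGetD_zero]
    simp only [pvF, Finset.sum_range_succ, pvR, pvL, List.getD,
      List.getElem?_eq_getElem hm, Option.getD_some]
    ring

theorem telescope (cs : List (List Int)) (n : ℕ) (hn : 1 ≤ n) :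
    pvG cs n = pvF cs n - (pvR cs (n - 1) - pvL cs 0) := by
  induction n with
  | zero => omega
  | succ m ih =>
    by_cases hm : m = 0
    · subst hm
      simp [pvG, pvF]
    · have hG : pvG cs (m + 1) = pvG cs m + (pvR cs (m - 1) - pvL cs m) := by
        simp [pvG, Finset.sum_range_succ, hm]
      have hF : pvF cs (m + 1) = pvF cs m + (pvR cs m - pvL cs m) := by
        simp only [pvF, Finset.sum_range_succ]
      rw [hG, hF, ih (by omega)]
      have he : m + 1 - 1 = m := rfl
      rw [he]
      ring

theorem street_eq_alt (input1 : Int) (input2 : List (List Int))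
    (hpre : Pre_street input1 input2) : street input1 input2 = street_alt input1 input2 := by
  by_cases h : input1 < 1
  · simp [street, street_alt, if_pos h,
      PySem.List.pyRange_one_eq_nil (show input1 ≤ 0 by omega),
      PySem.List.pyRange_one_eq_nil (show input1 ≤ 1 by omega)]
  · set n := input1.toNat with hn
    have hcast : input1 = (n : Int) := by omega
    have hn1 : 1 ≤ n := by omega
    have hlen : n ≤ input2.length := by
      have h2 := hpre.1; omega
    have e1 : PySem.List.pyGetD (PySem.List.pyGetD input2 (input1 - 1) []) 1 0
        = pvR input2 (n - 1) := by
      rw [hcast]; exact pvGet2_pred input2 n hn1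
    have e0 : PySem.List.pyGetD (PySem.List.pyGetD input2 0 []) 0 0 = pvL input2 0 := by
      simpa using pvGet2_zero input2 0
    have hB : street_alt input1 input2
        = 2 * (pvR input2 (n - 1) - pvL input2 0) - (0 + pvF input2 n) := by
      rw [street_alt, if_neg (by omega)]
      rw [PySem.List.slice_to _ (by omega : (0:Int) ≤ input1)]
      rw [← hn, fold3_eq input2 n hlen 0, e1, e0]
    rw [hB, street]
    simp only [hcast, fold1_eq, fold2_eq]
    rw [telescope input2 n hn1]
    ring

-- ===== VERDICT (by name: the statement is the Claim_ definition above) =====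
theorem street_spec : Claim_equal_street := by
  intro input1 input2 _ hpre
  unfold Spec_street
  exact street_eq_alt input1 input2 hpre
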